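-- pv_equiv track=rewrite | github.com/Mykelxu/imc-prosperity-4-fortuna | Round1/trader_pepper_buyhold_osmium_onesided_v1.py | getVolumeWeightedLevelPrice
-- ===== SOURCE A (Python) =====
-- from typing import Dict, List, Any, Optional, Tuple
--
-- def getVolumeWeightedLevelPrice(levels: List[Tuple[int, int]], isBid: bool) -> Optional[int]:
--     if not levels:
--         return None
--
--     bestPrice = levels[0][0]
--     bestAbsVolume = abs(levels[0][1])
--
--     for price, volume in levels[1:]:
--         absVolume = abs(volume)
--         if absVolume > bestAbsVolume:
--             bestPrice = price
--             bestAbsVolume = absVolume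
--         elif absVolume == bestAbsVolume:
--             if isBid and price > bestPrice:
--                 bestPrice = price
--             if not isBid and price < bestPrice:
--                 bestPrice = price
--
--     return bestPrice
-- ===== SOURCE B (Python) =====
-- def getVolumeWeightedLevelPrice(levels, isBid):
--     if not levels:
--         return None
--     m = max(abs(v) for _, v in levels)
--     prices = [p for p, v in levels if abs(v) == m]
--     return max(prices) if isBid else min(prices)
-- ===== Notes on version B (the rewrite author's own statement) =====
-- stated objective: simpler
-- what changed: Replaces the single-pass running-best scan with branch logic by staged passes: first compute the maximum absolute volume, then collect every price at that volume, then take the max of them for bids or the min for asks.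
import Mathlib
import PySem

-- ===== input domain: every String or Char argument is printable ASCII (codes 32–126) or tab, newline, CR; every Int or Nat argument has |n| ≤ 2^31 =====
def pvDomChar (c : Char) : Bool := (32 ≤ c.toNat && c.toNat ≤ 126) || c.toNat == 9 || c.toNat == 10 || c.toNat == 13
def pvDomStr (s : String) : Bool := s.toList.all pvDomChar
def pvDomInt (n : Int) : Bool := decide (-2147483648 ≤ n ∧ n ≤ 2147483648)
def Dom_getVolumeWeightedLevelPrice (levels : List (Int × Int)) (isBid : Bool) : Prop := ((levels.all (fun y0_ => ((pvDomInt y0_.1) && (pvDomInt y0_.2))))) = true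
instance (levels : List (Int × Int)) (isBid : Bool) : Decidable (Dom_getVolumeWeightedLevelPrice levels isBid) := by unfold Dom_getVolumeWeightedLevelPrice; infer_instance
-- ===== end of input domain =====

-- B replaces A's single-pass running-best scan by staged passes: max absolute volume first,
-- then all prices at that volume, then max (bids) / min (asks) of those prices; same O(n) cost.

-- ===== PORT A =====
-- loop body of A's 'for price, volume in levels[1:]': state = (bestPrice, bestAbsVolume)
def gvStepA (isBid : Bool) (st : Int × Int) (pv : Int × Int) : Int × Int :=
  let absVolume := |pv.2|
  if absVolume > st.2 then (pv.1, absVolume)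
  else if absVolume = st.2 then
    let bp1 := if isBid = true ∧ pv.1 > st.1 then pv.1 else st.1
    let bp2 := if (¬ isBid = true) ∧ pv.1 < bp1 then pv.1 else bp1
    (bp2, st.2)
  else st

def getVolumeWeightedLevelPrice (levels : List (Int × Int)) (isBid : Bool) : Option Int :=
  match levels with
  | [] => none
  | l0 :: rest => some ((rest.foldl (gvStepA isBid) (l0.1, |l0.2|)).1)

-- ===== PORT B =====
-- 'max(abs(v) for _, v in levels)' on the (guarded nonempty) list = fold of max over the abs volumes
def getVolumeWeightedLevelPrice_alt (levels : List (Int × Int)) (isBid : Bool) : Option Int :=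
  match levels with
  | [] => none
  | l0 :: rest =>
    let m := rest.foldl (fun a pv => max a |pv.2|) |l0.2|
    let prices := (levels.filter (fun pv => decide (|pv.2| = m))).map Prod.fst
    if isBid then prices.max? else prices.min?

-- ===== PRECONDITION & SPEC =====
def Spec_getVolumeWeightedLevelPrice (levels : List (Int × Int)) (isBid : Bool) (out : Option Int) : Prop := out = getVolumeWeightedLevelPrice_alt levels isBid
instance (levels : List (Int × Int)) (isBid : Bool) (out : Option Int) : Decidable (Spec_getVolumeWeightedLevelPrice levels isBid out) := by unfold Spec_getVolumeWeightedLevelPrice; infer_instance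

-- ===== CLAIM (what is proved, stated in full; the proofs are below) =====
def Claim_equal_getVolumeWeightedLevelPrice : Prop := ∀ (levels : List (Int × Int)) (isBid : Bool), Dom_getVolumeWeightedLevelPrice levels isBid → Spec_getVolumeWeightedLevelPrice levels isBid (getVolumeWeightedLevelPrice levels isBid)

-- ===== LEMMAS AND PROOFS =====

-- maximum absolute volume of xs, seeded with A
def gvMAbs (A : Int) (xs : List (Int × Int)) : Int :=
  xs.foldl (fun a pv => max a |pv.2|) A

-- candidate prices: the seed price P if the seed volume A attains the max, plus
-- every price of xs whose absolute volume attains the max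
def gvCand (P A : Int) (xs : List (Int × Int)) : List Int :=
  (if A = gvMAbs A xs then [P] else [])
    ++ (xs.filter (fun pv => decide (|pv.2| = gvMAbs A xs))).map Prod.fst

lemma gvStepA_snd (isBid : Bool) (P A : Int) (pv : Int × Int) :
    (gvStepA isBid (P, A) pv).2 = max A |pv.2| := by
  rcases lt_trichotomy A |pv.2| with h | h | h
  · simp [gvStepA, h, max_eq_right h.le]
  · simp [gvStepA, h]
  · simp [gvStepA, not_lt.2 h.le, h.ne, max_eq_left h.le]

lemma gvMAbs_le (A : Int) (xs : List (Int × Int)) : A ≤ gvMAbs A xs := by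
  induction xs generalizing A with
  | nil => exact le_refl _
  | cons x t ih =>
    calc A ≤ max A |x.2| := le_max_left _ _
      _ ≤ gvMAbs (max A |x.2|) t := ih _
      _ = gvMAbs A (x :: t) := rfl

lemma gvCand_cons (P A : Int) (x : Int × Int) (t : List (Int × Int)) :
    gvCand P A (x :: t) =
      (if A = gvMAbs (max A |x.2|) t then [P] else [])
      ++ (if |x.2| = gvMAbs (max A |x.2|) t then [x.1] else [])
      ++ (t.filter (fun pv => decide (|pv.2| = gvMAbs (max A |x.2|) t))).map Prod.fst := by
  have hM : gvMAbs A (x :: t) = gvMAbs (max A |x.2|) t := rfl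
  simp only [gvCand, hM, List.filter_cons, decide_eq_true_eq]
  by_cases h : |x.2| = gvMAbs (max A |x.2|) t
  · rw [if_pos h, if_pos h]
    simp only [List.map_cons, List.append_assoc, List.singleton_append]
  · rw [if_neg h, if_neg h]
    simp only [List.append_nil]

-- one loop step of A is absorbed into the candidate list of B
lemma gvCand_step (isBid : Bool) (P A : Int) (x : Int × Int) (t : List (Int × Int)) :
    (if isBid then (gvCand P A (x :: t)).max? else (gvCand P A (x :: t)).min?)
      = (if isBid then (gvCand (gvStepA isBid (P, A) x).1 (gvStepA isBid (P, A) x).2 t).max?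
         else (gvCand (gvStepA isBid (P, A) x).1 (gvStepA isBid (P, A) x).2 t).min?) := by
  have hMle := gvMAbs_le (max A |x.2|) t
  rcases lt_trichotomy A |x.2| with h | h | h
  · -- strictly larger volume: the new element replaces the running best
    have hstep : gvStepA isBid (P, A) x = (x.1, |x.2|) := by simp [gvStepA, h]
    have hmx : max A |x.2| = |x.2| := max_eq_right h.le
    have hAne : A ≠ gvMAbs |x.2| t := by
      have h2 : |x.2| ≤ gvMAbs (max A |x.2|) t := le_trans (le_max_right A _) hMle
      rw [hmx] at h2
      omega
    have hcand : gvCand P A (x :: t) = gvCand x.1 |x.2| t := by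
      rw [gvCand_cons, hmx, if_neg hAne, gvCand]
      rfl
    rw [hstep, hcand]
  · -- equal volume: the two head candidates merge into max/min of the two prices
    have hmx : max A |x.2| = A := max_eq_left h.ge
    have hnotlt : ¬ |x.2| > A := by omega
    by_cases hAM : A = gvMAbs A t
    · have hcandL : gvCand P A (x :: t)
          = P :: x.1 :: (t.filter (fun pv => decide (|pv.2| = gvMAbs A t))).map Prod.fst := by
        rw [gvCand_cons, hmx, if_pos hAM, if_pos (h ▸ hAM : |x.2| = gvMAbs A t)]
        rfl
      cases isBid with
      | true =>
        have hstep : gvStepA true (P, A) x = (max P x.1, A) := by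
          simp only [gvStepA, ← h]
          by_cases hp : x.1 > P <;> simp [hp, max_def] <;> omega
        have hcandR : gvCand (max P x.1) A t
            = max P x.1 :: (t.filter (fun pv => decide (|pv.2| = gvMAbs A t))).map Prod.fst := by
          rw [gvCand, if_pos hAM]; rfl
        rw [hstep]
        simp [hcandL, hcandR, List.max?]
      | false =>
        have hstep : gvStepA false (P, A) x = (min P x.1, A) := by
          simp only [gvStepA, ← h]
          by_cases hp : x.1 < P <;> simp [hp, min_def]
        have hcandR : gvCand (min P x.1) A t
            = min P x.1 :: (t.filter (fun pv => decide (|pv.2| = gvMAbs A t))).map Prod.fst := by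
          rw [gvCand, if_pos hAM]; rfl
        rw [hstep]
        simp [hcandL, hcandR, List.min?]
    · have hxne : ¬ |x.2| = gvMAbs A t := by omega
      have hcand : gvCand P A (x :: t) = (t.filter (fun pv => decide (|pv.2| = gvMAbs A t))).map Prod.fst := by
        rw [gvCand_cons, hmx, if_neg hAM, if_neg hxne]
        simp only [List.append_nil, List.nil_append]
      have hcandR : gvCand (gvStepA isBid (P, A) x).1 (gvStepA isBid (P, A) x).2 t
          = (t.filter (fun pv => decide (|pv.2| = gvMAbs A t))).map Prod.fst := by
        have h2 : (gvStepA isBid (P, A) x).2 = A := by rw [gvStepA_snd, hmx]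
        rw [gvCand, h2, if_neg hAM]
        rfl
      rw [hcand, hcandR]
  · -- strictly smaller volume: the element is ignored
    have hstep : gvStepA isBid (P, A) x = (P, A) := by
      simp [gvStepA, not_lt.2 h.le, h.ne]
    have hmx : max A |x.2| = A := max_eq_left h.le
    have hxne : ¬ |x.2| = gvMAbs A t := by
      have := gvMAbs_le A t
      omega
    have hcand : gvCand P A (x :: t) = gvCand P A t := by
      rw [gvCand_cons, hmx, if_neg hxne, gvCand]
      simp only [List.append_nil]
    rw [hstep, hcand]

-- main invariant: A's fold computes the max absolute volume, and B's max?/min?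
-- of the candidate prices names exactly A's running best price
lemma gvMain (isBid : Bool) :
    ∀ (xs : List (Int × Int)) (P A : Int),
      (xs.foldl (gvStepA isBid) (P, A)).2 = gvMAbs A xs ∧
      (if isBid then (gvCand P A xs).max? else (gvCand P A xs).min?)
        = some (xs.foldl (gvStepA isBid) (P, A)).1 := by
  intro xs
  induction xs with
  | nil =>
    intro P A
    refine ⟨rfl, ?_⟩
    cases isBid <;> simp [gvCand, gvMAbs, List.max?, List.min?]
  | cons x t ih =>
    intro P A
    have hM : gvMAbs A (x :: t) = gvMAbs (max A |x.2|) t := rfl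
    have hfold : (x :: t).foldl (gvStepA isBid) (P, A)
        = t.foldl (gvStepA isBid) (gvStepA isBid (P, A) x) := rfl
    obtain ⟨ih2, ih1⟩ := ih (gvStepA isBid (P, A) x).1 (gvStepA isBid (P, A) x).2
    have hpr : ((gvStepA isBid (P, A) x).1, (gvStepA isBid (P, A) x).2)
        = gvStepA isBid (P, A) x := rfl
    rw [hpr] at ih2 ih1
    refine ⟨by rw [hfold, ih2, gvStepA_snd, hM], ?_⟩
    rw [hfold, ← ih1]
    exact gvCand_step isBid P A x t

-- ===== VERDICT (by name: the statement is the Claim_ definition above) =====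
theorem getVolumeWeightedLevelPrice_spec : Claim_equal_getVolumeWeightedLevelPrice := by
  intro levels isBid _
  unfold Spec_getVolumeWeightedLevelPrice
  cases levels with
  | nil => rfl
  | cons l0 rest =>
    obtain ⟨h2, h1⟩ := gvMain isBid rest l0.1 |l0.2|
    have hcand : ((l0 :: rest).filter (fun pv => decide (|pv.2| = gvMAbs |l0.2| rest))).map Prod.fst
        = gvCand l0.1 |l0.2| rest := by
      simp only [gvCand, List.filter_cons, decide_eq_true_eq]
      by_cases h : |l0.2| = gvMAbs |l0.2| rest
      · rw [if_pos h, if_pos h]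
        simp only [List.map_cons, List.singleton_append]
      · rw [if_neg h, if_neg h]
        simp only [List.nil_append]
    have halt : getVolumeWeightedLevelPrice_alt (l0 :: rest) isBid
        = if isBid then (gvCand l0.1 |l0.2| rest).max? else (gvCand l0.1 |l0.2| rest).min? := by
      show (if isBid
          then (((l0 :: rest).filter (fun pv => decide (|pv.2| = gvMAbs |l0.2| rest))).map Prod.fst).max?
          else (((l0 :: rest).filter (fun pv => decide (|pv.2| = gvMAbs |l0.2| rest))).map Prod.fst).min?)
        = _
      rw [hcand]
    rw [halt, h1]
    rfl
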